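-- pv_equiv track=rewrite | github.com/r-vage/ComfyUI_RvTools | py/wrappers/nunchaku_wrapper.py | is_nunchaku_model_by_name
-- ===== SOURCE A (Python) =====
-- def is_nunchaku_model_by_name(filename: str) -> bool:
--     """
--     Detect Nunchaku models by filename patterns.
--
--     Nunchaku quantized models typically follow naming conventions:
--     - svdq-fp4_* (SVDQuant FP4 quantization)
--     - svdq-int4_* (SVDQuant INT4 quantization)
--     - nunchaku-* (Generic Nunchaku prefix)
--     - *-quant-* (Generic quantization marker)
--
--     Parameters
--     ----------
--     filename : str
--         The model filename to check
--
--     Returns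
--     -------
--     bool
--         True if filename matches Nunchaku patterns
--
--     Examples
--     --------
--     >>> is_nunchaku_model_by_name("svdq-fp4_r32-flux-dev.safetensors")
--     True
--     >>> is_nunchaku_model_by_name("flux1-dev.safetensors")
--     False
--     """
--     filename_lower = filename.lower()
--
--     nunchaku_patterns = [
--         'svdq-fp4',      # SVDQuant FP4
--         'svdq-int4',     # SVDQuant INT4
--         'nunchaku-',     # Nunchaku prefix
--         'svdquant-',     # SVDQuant generic
--         '-quant-',       # Generic quantization marker
--     ]
--
--     return any(pattern in filename_lower for pattern in nunchaku_patterns)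
-- ===== SOURCE B (Python) =====
-- def is_nunchaku_model_by_name(filename: str) -> bool:
--     # Single left-to-right scan: at each position, test whether any marker starts there.
--     s = filename.lower()
--     pats = ('svdq-fp4', 'svdq-int4', 'nunchaku-', 'svdquant-', '-quant-')
--     for i in range(len(s)):
--         if any(s.startswith(p, i) for p in pats):
--             return True
--     return False
-- ===== Notes on version B (the rewrite author's own statement) =====
-- stated objective: alternative
-- what changed: Replaces five independent substring-containment tests with one left-to-right scan over the lowercased filename that tests all five markers as prefixes at each position.
import Mathlib
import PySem

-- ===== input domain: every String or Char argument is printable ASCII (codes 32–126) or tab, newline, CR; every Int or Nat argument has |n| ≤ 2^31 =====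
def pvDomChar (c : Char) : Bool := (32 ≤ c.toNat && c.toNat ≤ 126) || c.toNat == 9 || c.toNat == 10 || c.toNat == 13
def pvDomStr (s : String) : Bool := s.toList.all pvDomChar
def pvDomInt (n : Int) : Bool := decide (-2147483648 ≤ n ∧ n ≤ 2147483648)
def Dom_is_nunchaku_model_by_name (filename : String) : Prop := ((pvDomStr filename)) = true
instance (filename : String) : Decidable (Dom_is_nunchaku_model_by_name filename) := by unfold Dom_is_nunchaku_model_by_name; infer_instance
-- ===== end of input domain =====

-- B replaces five independent substring-containment tests with one left-to-right scan
-- testing all five markers as prefixes at each position; alternative structure, same result.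

-- ===== PORT A =====
def pvPatternsA : List String :=
  ["svdq-fp4", "svdq-int4", "nunchaku-", "svdquant-", "-quant-"]

def is_nunchaku_model_by_name (filename : String) : Bool :=
  let filename_lower := PySem.Str.lower filename
  pvPatternsA.any (fun pattern => PySem.Str.isIn pattern filename_lower)

-- ===== PORT B =====
def pvPatternsB : List (List Char) :=
  ["svdq-fp4".toList, "svdq-int4".toList, "nunchaku-".toList, "svdquant-".toList, "-quant-".toList]

-- the position loop `for i in range(len(s)): if any(s.startswith(p, i) ...)` as recursion over suffixes
def pvScan : List Char → Bool
  | [] => false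
  | c :: rest => pvPatternsB.any (fun p => p.isPrefixOf (c :: rest)) || pvScan rest

def is_nunchaku_model_by_name_alt (filename : String) : Bool :=
  pvScan (PySem.Str.lower filename).toList

-- ===== PRECONDITION & SPEC =====
def Spec_is_nunchaku_model_by_name (filename : String) (out : Bool) : Prop := out = is_nunchaku_model_by_name_alt filename
instance (filename : String) (out : Bool) : Decidable (Spec_is_nunchaku_model_by_name filename out) := by unfold Spec_is_nunchaku_model_by_name; infer_instance

-- ===== CLAIM (what is proved, stated in full; the proofs are below) =====
def Claim_equal_is_nunchaku_model_by_name : Prop := ∀ (filename : String), Dom_is_nunchaku_model_by_name filename → Spec_is_nunchaku_model_by_name filename (is_nunchaku_model_by_name filename)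

-- ===== LEMMAS AND PROOFS =====

theorem pvScan_iff (cs : List Char) :
    pvScan cs = true ↔ ∃ p ∈ pvPatternsB, p <:+: cs := by
  induction cs with
  | nil =>
      simp only [pvScan]
      constructor
      · intro h; exact absurd h (by decide)
      rintro ⟨p, hp, hinf⟩
      exfalso
      have : p = [] := List.eq_nil_of_infix_nil hinf
      subst this
      simp [pvPatternsB] at hp
  | cons c rest ih =>
      simp only [pvScan, Bool.or_eq_true, List.any_eq_true, ih]
      constructor
      · rintro (⟨p, hp, hpre⟩ | ⟨p, hp, hinf⟩)
        · exact ⟨p, hp, (List.isPrefixOf_iff_prefix.mp hpre).isInfix⟩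
        · exact ⟨p, hp, hinf.trans (List.suffix_cons c rest).isInfix⟩
      · rintro ⟨p, hp, hinf⟩
        rcases List.infix_cons_iff.mp hinf with hpre | hinf'
        · exact Or.inl ⟨p, hp, List.isPrefixOf_iff_prefix.mpr hpre⟩
        · exact Or.inr ⟨p, hp, hinf'⟩

theorem pvA_iff (s : String) :
    is_nunchaku_model_by_name s = true ↔
      ∃ p ∈ pvPatternsB, p <:+: (PySem.Str.lower s).toList := by
  unfold is_nunchaku_model_by_name
  simp only [List.any_eq_true]
  constructor
  · rintro ⟨p, hp, h⟩
    refine ⟨p.toList, ?_, ?_⟩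
    · fin_cases hp <;> simp [pvPatternsB]
    · rw [PySem.Str.isIn_eq] at h
      exact (PySem.Chars.isIn_iff_infix _ _).mp h
  · rintro ⟨p, hp, h⟩
    refine ⟨String.ofList p, ?_, ?_⟩
    · fin_cases hp <;> decide
    · rw [PySem.Str.isIn_eq]
      exact (PySem.Chars.isIn_iff_infix _ _).mpr (by simpa using h)

-- ===== VERDICT (by name: the statement is the Claim_ definition above) =====
theorem is_nunchaku_model_by_name_spec : Claim_equal_is_nunchaku_model_by_name := by
  intro filename _
  unfold Spec_is_nunchaku_model_by_name is_nunchaku_model_by_name_alt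
  rcases hb : pvScan (PySem.Str.lower filename).toList with _ | _
  · rw [← Bool.not_eq_true] at hb ⊢
    intro ha
    exact hb ((pvScan_iff _).mpr ((pvA_iff _).mp ha))
  · exact (pvA_iff _).mpr ((pvScan_iff _).mp hb)
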